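-- pv_equiv track=rewrite | github.com/cyaoxuan/NAPFA-Score-Checker | app.py | get_award
-- ===== SOURCE A (Python) =====
-- def get_award(points):
--     # Bronze Award Requirements: At least an E grade performance in all 6 test items and a total of 6 or more points.
--     # Silver Award Requirements: At least a D grade performance in all 6 test items and a total of 15 or more points.
--     # Gold Award Requirements: At least a C grade performance in all 6 test items and a total of 21 or more points.
--     if sum(points) >= 21 and all(point >= 3 for point in points):
--         return "Gold"
--     elif sum(points) >= 15 and all(point >= 2 for point in points):
--         return "Silver"
--     elif sum(points) >= 6 and all(point >= 1 for point in points):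
--         return "Bronze"
--     else:
--         return "-"
-- ===== SOURCE B (Python) =====
-- def get_award(points):
--     total = sum(points)
--     tier_total = (total >= 6) + (total >= 15) + (total >= 21)
--     tier_min = 3
--     for p in points:
--         tier_min = min(tier_min, max(0, min(p, 3)))
--     return ["-", "Bronze", "Silver", "Gold"][min(tier_total, tier_min)]
-- ===== Notes on version B (the rewrite author's own statement) =====
-- stated objective: alternative
-- what changed: B replaces A's chain of per-tier sum/all() tests with an arithmetic formulation: it counts how many sum thresholds are met, clamps the minimum point between 0 and 3, takes the min of the two numeric tier levels and indexes a name table (correct because the tier requirements are nested).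
import Mathlib
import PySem

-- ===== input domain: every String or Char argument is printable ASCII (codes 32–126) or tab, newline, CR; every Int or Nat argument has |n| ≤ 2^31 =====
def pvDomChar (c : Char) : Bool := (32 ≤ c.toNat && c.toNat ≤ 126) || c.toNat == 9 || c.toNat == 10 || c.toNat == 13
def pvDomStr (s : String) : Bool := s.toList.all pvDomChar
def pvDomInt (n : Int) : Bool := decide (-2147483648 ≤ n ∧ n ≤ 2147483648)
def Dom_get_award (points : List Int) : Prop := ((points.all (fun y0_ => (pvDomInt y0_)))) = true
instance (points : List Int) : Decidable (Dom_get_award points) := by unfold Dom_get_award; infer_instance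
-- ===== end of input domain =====

-- B: an arithmetic tier-level formulation (count of sum thresholds met, clamped minimum point,
-- min of the two indexes a name table) instead of A's per-tier condition chain; same cost.
-- ===== PORT A =====
def get_award (points : List Int) : String :=
  if points.sum ≥ 21 ∧ points.all (fun point => 3 ≤ point) = true then "Gold"
  else if points.sum ≥ 15 ∧ points.all (fun point => 2 ≤ point) = true then "Silver"
  else if points.sum ≥ 6 ∧ points.all (fun point => 1 ≤ point) = true then "Bronze"
  else "-"

-- ===== PORT B =====
def totalTier (total : Int) : Int :=
  (if total ≥ 6 then 1 else 0) + (if total ≥ 15 then 1 else 0) + (if total ≥ 21 then 1 else 0)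

def clampMin (points : List Int) : Int :=
  points.foldl (fun tier_min p => min tier_min (max 0 (min p 3))) 3

def get_award_alt (points : List Int) : String :=
  (["-", "Bronze", "Silver", "Gold"] : List String).getD
    (min (totalTier points.sum) (clampMin points)).toNat "-"

-- ===== PRECONDITION & SPEC =====
def Spec_get_award (points : List Int) (out : String) : Prop := out = get_award_alt points
instance (points : List Int) (out : String) : Decidable (Spec_get_award points out) := by unfold Spec_get_award; infer_instance

-- ===== CLAIM (what is proved, stated in full; the proofs are below) =====
def Claim_equal_get_award : Prop := ∀ (points : List Int), Dom_get_award points → Spec_get_award points (get_award points)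

-- ===== LEMMAS AND PROOFS =====
lemma le_clampFold (g acc : Int) (t : List Int) :
    g ≤ t.foldl (fun a p => min a (max 0 (min p 3))) acc ↔
      g ≤ acc ∧ ∀ p ∈ t, g ≤ max 0 (min p 3) := by
  induction t generalizing acc with
  | nil => simp
  | cons x t ih =>
      simp only [List.foldl_cons, ih, le_min_iff, List.mem_cons]
      constructor
      · rintro ⟨⟨h1, h2⟩, h3⟩
        exact ⟨h1, fun p hp => by rcases hp with rfl | hp; exact h2; exact h3 p hp⟩
      · rintro ⟨h1, h2⟩
        exact ⟨⟨h1, h2 x (Or.inl rfl)⟩, fun p hp => h2 p (Or.inr hp)⟩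

lemma clampMin_nonneg (points : List Int) : 0 ≤ clampMin points := by
  rw [clampMin, le_clampFold]
  exact ⟨by norm_num, fun p _ => le_max_left _ _⟩

lemma foldl_clamp_le_acc (acc : Int) (t : List Int) :
    t.foldl (fun a p => min a (max 0 (min p 3))) acc ≤ acc := by
  induction t generalizing acc with
  | nil => simp
  | cons x t ih => exact le_trans (ih _) (min_le_left _ _)

lemma clampMin_le_three (points : List Int) : clampMin points ≤ 3 :=
  foldl_clamp_le_acc 3 points

lemma clampMin_ge_iff (g : Int) (hg : 1 ≤ g) (hg3 : g ≤ 3) (points : List Int) :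
    g ≤ clampMin points ↔ ∀ p ∈ points, g ≤ p := by
  rw [clampMin, le_clampFold]
  constructor
  · rintro ⟨-, h⟩ p hp
    have := h p hp; omega
  · intro h
    exact ⟨hg3, fun p hp => by have := h p hp; omega⟩

-- ===== VERDICT (by name: the statement is the Claim_ definition above) =====
theorem get_award_spec : Claim_equal_get_award := by
  intro points _
  unfold Spec_get_award get_award get_award_alt
  have h0 := clampMin_nonneg points
  have h3 := clampMin_le_three points
  have e3 := clampMin_ge_iff 3 (by norm_num) (by norm_num) points
  have e2 := clampMin_ge_iff 2 (by norm_num) (by norm_num) points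
  have e1 := clampMin_ge_iff 1 (by norm_num) (by norm_num) points
  simp only [List.all_eq_true, decide_eq_true_eq, ge_iff_le, ← e1, ← e2, ← e3]
  have htt : totalTier points.sum =
      if 21 ≤ points.sum then 3 else if 15 ≤ points.sum then 2
      else if 6 ≤ points.sum then 1 else 0 := by
    unfold totalTier; split_ifs <;> omega
  rw [htt]
  generalize clampMin points = L at *
  interval_cases L <;> split_ifs <;> first
    | rfl
    | omega
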